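-- pv_equiv track=rewrite | github.com/Emieeel/auto_oo | src/auto_oo/opt/newton_raphson.py | split_list_shapes
-- ===== SOURCE A (Python) =====
-- def split_list_shapes(l, paramshapes):
--     """Divide list l into parts with given shapes."""
--     if not sum(paramshapes) == len(l):
--         raise ValueError('sum of paramshapes has to be equal to length of list!')
--     chunks = []
--     num = 0
--     for shape in paramshapes:
--         chunks.append(l[num:num+shape])
--         num+=shape
--     return chunks
-- ===== SOURCE B (Python) =====
-- def split_list_shapes(l, paramshapes):
--     """Divide list l into parts with given shapes."""
--     if not sum(paramshapes) == len(l):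
--         raise ValueError('sum of paramshapes has to be equal to length of list!')
--     bounds = [0]
--     for shape in paramshapes:
--         bounds.append(bounds[-1] + shape)
--     return [l[a:b] for a, b in zip(bounds, bounds[1:])]
-- ===== Notes on version B (the rewrite author's own statement) =====
-- stated objective: alternative
-- what changed: Precomputes the full table of boundary offsets (prefix sums) first, then builds every chunk in a separate pass by slicing between consecutive boundary pairs, instead of mutating a running counter while appending chunks in one loop.
import Mathlib
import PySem

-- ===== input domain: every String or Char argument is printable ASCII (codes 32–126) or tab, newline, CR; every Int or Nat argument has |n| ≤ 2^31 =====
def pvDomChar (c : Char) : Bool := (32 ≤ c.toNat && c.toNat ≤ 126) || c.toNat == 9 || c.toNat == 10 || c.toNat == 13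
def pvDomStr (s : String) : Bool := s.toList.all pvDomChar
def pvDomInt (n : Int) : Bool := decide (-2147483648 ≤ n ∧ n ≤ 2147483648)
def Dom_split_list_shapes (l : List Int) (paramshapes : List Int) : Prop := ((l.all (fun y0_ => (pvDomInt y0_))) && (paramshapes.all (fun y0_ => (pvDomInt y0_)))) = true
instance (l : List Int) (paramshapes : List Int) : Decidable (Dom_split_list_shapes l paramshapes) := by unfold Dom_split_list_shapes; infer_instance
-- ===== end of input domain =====

-- B precomputes the whole boundary-offset table (prefix sums) first and then slices
-- between consecutive boundary pairs in a second pass; same O(n+k) cost, different shape.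

-- ===== PORT A =====
-- one loop with a running counter `num`, appending l[num:num+shape] for each shape
def split_list_shapes (l : List Int) (paramshapes : List Int) : List (List Int) :=
  if paramshapes.sum ≠ (l.length : Int) then []   -- Python raises ValueError here; excluded by Pre_
  else
    (paramshapes.foldl
      (fun (st : List (List Int) × Int) shape =>
        (st.1 ++ [PySem.List.slice l (some st.2) (some (st.2 + shape))], st.2 + shape))
      ([], 0)).1

-- ===== PORT B =====
-- bounds = [0]; for shape: bounds.append(bounds[-1]+shape)  — i.e. a scanl —
-- then [l[a:b] for a,b in zip(bounds, bounds[1:])]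
def split_list_shapes_alt (l : List Int) (paramshapes : List Int) : List (List Int) :=
  if paramshapes.sum ≠ (l.length : Int) then []   -- Python raises ValueError here; excluded by Pre_
  else
    let bounds := List.scanl (· + ·) 0 paramshapes
    (bounds.zip bounds.tail).map (fun ab => PySem.List.slice l (some ab.1) (some ab.2))

-- ===== PRECONDITION & SPEC =====
-- Pre_ excludes exactly the inputs on which Python A raises ValueError (sum ≠ length).
def Pre_split_list_shapes (l : List Int) (paramshapes : List Int) : Prop :=
  paramshapes.sum = (l.length : Int)
instance (l : List Int) (paramshapes : List Int) : Decidable (Pre_split_list_shapes l paramshapes) := by unfold Pre_split_list_shapes; infer_instance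
def pvWitness_split_list_shapes : List Int × List Int := ([1, 2, 3], [1, 2])

def Spec_split_list_shapes (l : List Int) (paramshapes : List Int) (out : List (List Int)) : Prop := out = split_list_shapes_alt l paramshapes
instance (l : List Int) (paramshapes : List Int) (out : List (List Int)) : Decidable (Spec_split_list_shapes l paramshapes out) := by unfold Spec_split_list_shapes; infer_instance

-- ===== CLAIM (what is proved, stated in full; the proofs are below) =====
def Claim_equal_split_list_shapes : Prop := ∀ (l : List Int) (paramshapes : List Int), Dom_split_list_shapes l paramshapes → Pre_split_list_shapes l paramshapes → Spec_split_list_shapes l paramshapes (split_list_shapes l paramshapes)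

-- ===== LEMMAS AND PROOFS =====

-- canonical form both sides are reduced to: the chunks starting at offset n
def chunksFrom (l : List Int) : List Int → Int → List (List Int)
  | [], _ => []
  | s :: ps, n => PySem.List.slice l (some n) (some (n + s)) :: chunksFrom l ps (n + s)

theorem foldA_eq_chunksFrom (l : List Int) (ps : List Int) :
    ∀ (acc : List (List Int)) (n : Int),
      (ps.foldl
        (fun (st : List (List Int) × Int) shape =>
          (st.1 ++ [PySem.List.slice l (some st.2) (some (st.2 + shape))], st.2 + shape))
        (acc, n)).1 = acc ++ chunksFrom l ps n := by
  induction ps with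
  | nil => intro acc n; simp [chunksFrom]
  | cons s ps ih =>
      intro acc n
      simp [List.foldl, chunksFrom, ih, List.append_assoc]

theorem zipScan_eq_chunksFrom (l : List Int) (ps : List Int) :
    ∀ (n : Int),
      ((List.scanl (· + ·) n ps).zip (List.scanl (· + ·) n ps).tail).map
        (fun ab => PySem.List.slice l (some ab.1) (some ab.2)) = chunksFrom l ps n := by
  induction ps with
  | nil => intro n; simp [chunksFrom]
  | cons s ps ih =>
      intro n
      rw [List.scanl_cons]
      cases ps with
      | nil => simp [List.scanl, chunksFrom]
      | cons t ps' =>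
          have ih' := ih (n + s)
          rw [List.scanl_cons, List.tail_cons] at ih'
          simp only [List.tail_cons]
          rw [List.scanl_cons (f := (· + ·)) (b := n + s)]
          simp only [List.zip_cons_cons, List.map_cons]
          rw [ih']
          simp [chunksFrom]

-- ===== VERDICT (by name: the statement is the Claim_ definition above) =====
theorem split_list_shapes_spec : Claim_equal_split_list_shapes := by
  intro l ps _ hpre
  unfold Spec_split_list_shapes split_list_shapes split_list_shapes_alt
  rw [if_neg (by simpa using hpre), if_neg (by simpa using hpre)]
  rw [foldA_eq_chunksFrom l ps [] 0, zipScan_eq_chunksFrom l ps 0]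
  simp
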